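-- pv_equiv track=rewrite | github.com/jdschoneman/c19_ploting | plotting/read_data.py | foo
-- ===== SOURCE A (Python) =====
-- def foo(astr):
--     # replace , outside quotes with ;
--     # and strip out the quotes themsevlves
--     # a bit crude and specialized
--     start_ind = 0
--     items = list(astr)
--     while True:
--         try:
--             start_ind = items.index('"', start_ind)
--             stop_ind = items.index('"', start_ind + 1)
--             for ind in range(start_ind, stop_ind):
--                 items[ind] = items[ind].replace(',', ';')
--             start_ind = stop_ind + 1
--         except ValueError:
--             break
--
--     return ''.join(items)
-- ===== SOURCE B (Python) =====
-- def foo(astr):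
--     # Recursively peel off one closed quote pair at a time with str.partition,
--     # rebuilding the string; an unmatched final quote leaves the tail as is.
--     pre, q1, rest = astr.partition('"')
--     if not q1:
--         return astr
--     body, q2, tail = rest.partition('"')
--     if not q2:
--         return astr
--     return pre + '"' + body.replace(',', ';') + '"' + foo(tail)
-- ===== Notes on version B (the rewrite author's own statement) =====
-- stated objective: simpler
-- what changed: A scans for quote indices with list.index and mutates the char list in place per index; B iteratively peels one closed quote pair per step with str.partition and rebuilds the string from whole segments.
import Mathlib
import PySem

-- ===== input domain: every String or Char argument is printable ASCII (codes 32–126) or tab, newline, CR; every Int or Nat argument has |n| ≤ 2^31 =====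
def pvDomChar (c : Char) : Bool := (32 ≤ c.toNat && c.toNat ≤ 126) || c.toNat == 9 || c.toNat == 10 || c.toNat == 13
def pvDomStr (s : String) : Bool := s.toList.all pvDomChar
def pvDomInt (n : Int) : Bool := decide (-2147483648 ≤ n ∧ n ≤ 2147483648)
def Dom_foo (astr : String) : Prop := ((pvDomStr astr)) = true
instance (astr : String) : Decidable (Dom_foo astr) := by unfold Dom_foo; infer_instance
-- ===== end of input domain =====

-- B replaces A's index-scanning in-place mutation loop with an iterative
-- partition-based rebuild (peel one closed quote pair per step); objective: simpler.

-- ===== PORT A =====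

-- port of items[ind] = items[ind].replace(',', ';'): exact, items are single chars
def pvRepl (c : Char) : Char := if c = ',' then ';' else c

def fooSetStep (acc : List Char) (ind : Nat) : List Char :=
  acc.set ind (pvRepl (acc.getD ind ' '))

-- the for loop's per-index assignments keep the list length (used for termination)
theorem length_foldl_fooSetStep (l : List Nat) (items : List Char) :
    (l.foldl fooSetStep items).length = items.length := by
  induction l generalizing items with
  | nil => rfl
  | cons x t ih => simp [List.foldl, fooSetStep, ih]

-- loop of A; items.index('"', s) ported by hand as index? on items[s:] shifted by s (exact)
def fooLoop (items : List Char) (s : Nat) : List Char :=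
  match h1 : PySem.List.index? (items.drop s) '"' with
  | none => items
  | some i =>
    match h2 : PySem.List.index? (items.drop (s + i + 1)) '"' with
    | none => items
    | some j =>
      -- start_ind = s + i, stop_ind = s + i + 1 + j; range has stop - start = j + 1 indices
      fooLoop ((List.range' (s + i) (j + 1)).foldl fooSetStep items) (s + i + 1 + j + 1)
termination_by items.length - s
decreasing_by
  have hi := PySem.List.getElem_of_index?_eq_some h1
  have hj := PySem.List.getElem_of_index?_eq_some h2
  obtain ⟨hk, -, -⟩ := hi
  obtain ⟨hk2, -, -⟩ := hj
  simp [List.length_drop] at hk hk2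
  rw [length_foldl_fooSetStep]
  omega

-- ''.join(items) on single chars ported as String.mk (exact)
def foo (astr : String) : String := String.mk (fooLoop astr.toList 0)

-- ===== PORT B =====

-- while loop of B; rest.partition('"') ported by hand as
-- takeWhile/dropWhile on (· ≠ '"') (exact for a single-char separator)
def fooAltGo (out : List (List Char)) (rest : List Char) : List Char :=
  let pre := rest.takeWhile (fun c => c ≠ '"')
  match h1 : rest.dropWhile (fun c => c ≠ '"') with
  | [] => out.flatten ++ rest                            -- break: ''.join(out) + rest
  | _ :: r1 =>
    match h2 : r1.dropWhile (fun c => c ≠ '"') with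
    | [] => out.flatten ++ rest                          -- break: ''.join(out) + rest
    | _ :: r2 =>
      let body := r1.takeWhile (fun c => c ≠ '"')
      fooAltGo (out ++ [pre ++ '"' :: PySem.Chars.replace body [','] [';'] ++ ['"']]) r2
termination_by rest.length
decreasing_by
  have h1' : (rest.dropWhile (fun c => c ≠ '"')).length ≤ rest.length := List.length_dropWhile_le _ _
  have h2' : (r1.dropWhile (fun c => c ≠ '"')).length ≤ r1.length := List.length_dropWhile_le _ _
  rw [h1] at h1'
  rw [h2] at h2'
  simp at h1' h2'
  omega

def foo_alt (astr : String) : String := String.mk (fooAltGo [] astr.toList)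

-- ===== PRECONDITION & SPEC =====
def Spec_foo (astr : String) (out : String) : Prop := out = foo_alt astr
instance (astr : String) (out : String) : Decidable (Spec_foo astr out) := by unfold Spec_foo; infer_instance

-- ===== CLAIM (what is proved, stated in full; the proofs are below) =====
def Claim_equal_foo : Prop := ∀ (astr : String), Dom_foo astr → Spec_foo astr (foo astr)

-- ===== LEMMAS AND PROOFS =====

theorem replace_go_single (fuel : Nat) (l acc : List Char) (h : l.length ≤ fuel) :
    PySem.Chars.replace.go [','] [';'] fuel l acc = acc.reverse ++ l.map pvRepl := by
  induction fuel generalizing l acc with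
  | zero =>
    have : l = [] := by cases l <;> simp_all
    subst this; rw [PySem.Chars.replace.go.eq_def]; simp
  | succ n ih =>
    cases l with
    | nil => rw [PySem.Chars.replace.go.eq_def]; simp
    | cons c t =>
      rw [PySem.Chars.replace.go.eq_def]
      have hpre : [','].isPrefixOf (c :: t) = (c == ',') := by
        simp [List.isPrefixOf, eq_comm]
      simp only [hpre]
      by_cases hc : c = ','
      · subst hc
        rw [if_pos (by simp), ih _ _ (by simpa using h)]
        simp [pvRepl]
      · rw [if_neg (by simp [hc]), ih _ _ (by simpa using h)]
        simp [pvRepl, hc]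

theorem replace_single (l : List Char) :
    PySem.Chars.replace l [','] [';'] = l.map pvRepl := by
  unfold PySem.Chars.replace
  simpa using replace_go_single l.length l [] le_rfl

-- index? gives take/drop descriptions of takeWhile/dropWhile
theorem takeWhile_of_index? (cs : List Char) (i : Nat)
    (h : PySem.List.index? cs '"' = some i) :
    cs.takeWhile (fun c => c ≠ '"') = cs.take i ∧
    cs.dropWhile (fun c => c ≠ '"') = cs.drop i := by
  rw [PySem.List.index?_eq_some_iff] at h
  obtain ⟨pre, suf, rfl, rfl, hmem⟩ := h
  have hall : pre.takeWhile (fun c => decide (c ≠ '"')) = pre :=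
    List.takeWhile_eq_self_iff.mpr (by intro a ha; simp; exact fun e => hmem (e ▸ ha))
  have hdw : pre.dropWhile (fun c => decide (c ≠ '"')) = [] := by
    rw [List.dropWhile_eq_nil_iff]
    intro a ha; simp; exact fun e => hmem (e ▸ ha)
  constructor
  · rw [List.takeWhile_append]
    simp only [List.take_left, hall]
    simp
  · rw [List.dropWhile_append, hdw, List.drop_left]
    simp

theorem no_quote_whiles (cs : List Char) (h : PySem.List.index? cs '"' = none) :
    cs.dropWhile (fun c => c ≠ '"') = [] := by
  rw [PySem.List.index?_eq_none_iff] at h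
  simp [List.dropWhile_eq_nil_iff]
  intro a ha e; exact h (e ▸ ha)

-- the for loop over range(st, st+n) rewrites the slice [st, st+n) by pvRepl
theorem setFold_eq (items : List Char) (st n : Nat) (h : st + n ≤ items.length) :
    (List.range' st n).foldl fooSetStep items =
      items.take st ++ ((items.drop st).take n).map pvRepl ++ items.drop (st + n) := by
  induction n generalizing items st with
  | zero => simp
  | succ n ih =>
    have hst : st < items.length := by omega
    rw [List.range'_succ, List.foldl_cons]
    have hstep : fooSetStep items st = items.set st (pvRepl items[st]) := by
      unfold fooSetStep
      rw [List.getD_eq_getElem _ _ hst]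
    set v := pvRepl items[st] with hv
    have hsplit : items.set st v = items.take st ++ v :: items.drop (st + 1) := by
      rw [List.set_eq_take_append_cons_drop, if_pos hst]
    rw [hstep, ih _ (st + 1) (by simp; omega)]
    have hd1 : (items.set st v).drop (st + 1) = items.drop (st + 1) := by
      rw [List.drop_set, if_pos (by omega)]
    have hd2 : (items.set st v).drop (st + 1 + n) = items.drop (st + 1 + n) := by
      rw [List.drop_set, if_pos (by omega)]
    have ht1 : (items.set st v).take (st + 1) = items.take st ++ [v] := by
      rw [hsplit, List.take_append]
      simp [List.take_succ_cons, List.take_of_length_le, List.length_take, Nat.min_eq_left (le_of_lt hst)]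
    rw [hd1, hd2, ht1]
    have hsplit2 : (items.drop st).take (n + 1) = items[st] :: (items.drop (st + 1)).take n := by
      rw [← List.getElem_cons_drop hst, List.take_succ_cons]
    rw [hsplit2]
    have : st + 1 + n = st + (n + 1) := by omega
    rw [this]
    simp [List.append_assoc, hv]

-- step lemmas reducing the two loops by their match scrutinees

theorem go_nil (out : List (List Char)) (rest : List Char)
    (h : rest.dropWhile (fun c => c ≠ '"') = []) :
    fooAltGo out rest = out.flatten ++ rest := by
  rw [fooAltGo]; split
  · rfl
  · rename_i heq; rw [h] at heq; cases heq

theorem go_one (out : List (List Char)) (rest : List Char) (c : Char) (r1 : List Char)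
    (h : rest.dropWhile (fun c => c ≠ '"') = c :: r1)
    (h2 : r1.dropWhile (fun c => c ≠ '"') = []) :
    fooAltGo out rest = out.flatten ++ rest := by
  rw [fooAltGo]; split
  · rfl
  · rename_i c' r1' heq; rw [h] at heq; cases heq
    split
    · rfl
    · rename_i heq2; rw [h2] at heq2; cases heq2

theorem go_pair (out : List (List Char)) (rest : List Char) (c d : Char) (r1 r2 : List Char)
    (h : rest.dropWhile (fun c => c ≠ '"') = c :: r1)
    (h2 : r1.dropWhile (fun c => c ≠ '"') = d :: r2) :
    fooAltGo out rest = fooAltGo (out ++ [rest.takeWhile (fun c => c ≠ '"') ++ '"' :: PySem.Chars.replace (r1.takeWhile (fun c => c ≠ '"')) [','] [';'] ++ ['"']]) r2 := by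
  rw [fooAltGo]; split
  · rename_i heq; rw [h] at heq; try cases heq
  · rename_i c' r1' heq; rw [h] at heq; cases heq
    split
    · rename_i heq2; rw [h2] at heq2; try cases heq2
    · rename_i d' r2' heq2; rw [h2] at heq2; cases heq2; rfl

-- the accumulator of B's loop factors out (fueled induction)
theorem fooAltGo_acc_aux (n : Nat) : ∀ (rest : List Char), rest.length ≤ n →
    ∀ (out : List (List Char)), fooAltGo out rest = out.flatten ++ fooAltGo [] rest := by
  induction n with
  | zero =>
    intro rest hlen out
    have : rest = [] := by cases rest <;> simp_all
    subst this
    rw [go_nil _ _ (by simp), go_nil _ _ (by simp)]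
    simp
  | succ n ih =>
    intro rest hlen out
    cases h1 : rest.dropWhile (fun c => c ≠ '"') with
    | nil => rw [go_nil _ _ h1, go_nil _ _ h1]; simp
    | cons c r1 =>
      cases h2 : r1.dropWhile (fun c => c ≠ '"') with
      | nil => rw [go_one _ _ _ _ h1 h2, go_one _ _ _ _ h1 h2]; simp
      | cons d r2 =>
        rw [go_pair _ _ _ _ _ _ h1 h2, go_pair _ _ _ _ _ _ h1 h2]
        have hr2 : r2.length ≤ n := by
          have h1' := List.length_dropWhile_le (fun c => c ≠ '"') rest
          have h2' := List.length_dropWhile_le (fun c => c ≠ '"') r1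
          rw [h1] at h1'; rw [h2] at h2'; simp at h1' h2'; omega
        rw [List.nil_append]
        obtain ⟨blk, hb⟩ : ∃ b, (rest.takeWhile (fun c => c ≠ '"') ++ '"' :: PySem.Chars.replace (r1.takeWhile (fun c => c ≠ '"')) [','] [';'] ++ ['"']) = b := ⟨_, rfl⟩
        rw [hb]
        rw [ih r2 hr2 (out ++ [blk]), ih r2 hr2 [blk]]
        simp [List.append_assoc]

theorem fooAltGo_acc (out : List (List Char)) (rest : List Char) :
    fooAltGo out rest = out.flatten ++ fooAltGo [] rest :=
  fooAltGo_acc_aux rest.length rest le_rfl out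

-- main invariant: A's loop from position s equals the prefix plus B's loop on the suffix
theorem fooLoop_eq (items : List Char) (s : Nat) :
    fooLoop items s = items.take s ++ fooAltGo [] (items.drop s) := by
  fun_induction fooLoop items s with
  | case1 items s h1 =>
    rw [go_nil _ _ (no_quote_whiles _ h1), List.flatten_nil, List.nil_append,
      List.take_append_drop]
  | case2 items s i h1 h2 =>
    obtain ⟨htw, hdw⟩ := takeWhile_of_index? _ _ h1
    obtain ⟨hk, hv, -⟩ := PySem.List.getElem_of_index?_eq_some h1
    have hsi : s + i < items.length := by simp at hk; omega
    have hgi : items[s + i] = '"' := by rw [List.getElem_drop] at hv; exact hv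
    have hdsi : items.drop (s + i) = '"' :: items.drop (s + i + 1) := by
      rw [← List.getElem_cons_drop hsi, hgi]
    have hdw' : (items.drop s).dropWhile (fun c => c ≠ '"') = '"' :: items.drop (s + i + 1) := by
      rw [hdw, List.drop_drop, hdsi]
    rw [go_one _ _ _ _ hdw' (no_quote_whiles _ h2), List.flatten_nil, List.nil_append,
      List.take_append_drop]
  | case3 items s i h1 j h2 ih =>
    obtain ⟨hk1, hv1, -⟩ := PySem.List.getElem_of_index?_eq_some h1
    obtain ⟨hk2, hv2, -⟩ := PySem.List.getElem_of_index?_eq_some h2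
    have hL1 : s + i < items.length := by simp at hk1; omega
    have hL2 : s + i + 1 + j < items.length := by simp at hk2; omega
    have hg1 : items[s + i] = '"' := by rw [List.getElem_drop] at hv1; exact hv1
    have hg2 : items[s + i + 1 + j] = '"' := by
      rw [List.getElem_drop] at hv2; exact hv2
    set body : List Char := (items.drop (s + i + 1)).take j with hbody
    set D' : List Char := items.drop (s + i + 1 + j + 1) with hD'
    have hmid : ((items.drop (s + i)).take (j + 1)).map pvRepl
        = '"' :: body.map pvRepl := by
      rw [← List.getElem_cons_drop hL1, List.take_succ_cons, List.map_cons, hg1]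
      simp [pvRepl, hbody, List.map_take, List.map_drop]
    have hDsplit : items.drop (s + i + 1 + j) = '"' :: D' := by
      rw [← List.getElem_cons_drop hL2, hg2]
    have hitems' : (List.range' (s + i) (j + 1)).foldl fooSetStep items
        = (items.take (s + i) ++ '"' :: body.map pvRepl ++ ['"']) ++ D' := by
      rw [setFold_eq items (s + i) (j + 1) (by omega), hmid]
      have e1 : s + i + (j + 1) = s + i + 1 + j := by omega
      rw [e1, hDsplit]
      simp [List.append_assoc]
    have hPlen : (items.take (s + i)).length = s + i := by simp; omega
    have hblen : body.length = j := by rw [hbody]; simp; omega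
    have hAlen : (items.take (s + i) ++ '"' :: body.map pvRepl ++ ['"']).length = s + i + 1 + j + 1 := by
      simp [hPlen, hblen]; omega
    -- LHS via ih and take/drop of the rewritten items'
    rw [ih, hitems']
    rw [← hAlen, List.take_left, List.drop_left]
    -- RHS: evaluate fooAltGo on the suffix
    obtain ⟨htw1, hdw1⟩ := takeWhile_of_index? _ _ h1
    obtain ⟨htw2, hdw2⟩ := takeWhile_of_index? _ _ h2
    have hdw1' : (items.drop s).dropWhile (fun c => c ≠ '"') = '"' :: items.drop (s + i + 1) := by
      rw [hdw1, List.drop_drop, ← List.getElem_cons_drop hL1, hg1]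
    have hdw2' : (items.drop (s + i + 1)).dropWhile (fun c => c ≠ '"') = '"' :: D' := by
      rw [hdw2, List.drop_drop, ← hDsplit]
    rw [go_pair [] (items.drop s) '"' '"' (items.drop (s + i + 1)) D' hdw1' hdw2']
    rw [List.nil_append, fooAltGo_acc [_] D']
    rw [htw1, htw2, replace_single]
    have htakeadd : items.take (s + i) = items.take s ++ (items.drop s).take i := List.take_add
    rw [htakeadd]
    simp [List.append_assoc, hbody]

-- ===== VERDICT (by name: the statement is the Claim_ definition above) =====
theorem foo_spec : Claim_equal_foo := by
  intro astr _
  unfold Spec_foo foo foo_alt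
  rw [fooLoop_eq]
  simp
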